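-- pv_equiv track=rewrite | github.com/Waxmeneer/MAIRChatbot | variable_keyword_link.py | subtree_finder
-- ===== SOURCE A (Python) =====
-- def subtree_finder(topnode, parsed_sent, nodelist, index):
--     nodelist.append([topnode, index])
--     for node in parsed_sent:
--         if node[0]==topnode:
--             subtr1 = node[1]
--             subtr2 = node[2]
--             index = node[4]
--             subtree_finder(subtr1, parsed_sent, nodelist, index)
--             subtree_finder(subtr2, parsed_sent, nodelist, index)
--             return(nodelist)
--     return(nodelist)
-- ===== SOURCE B (Python) =====
-- def subtree_finder(topnode, parsed_sent, nodelist, index):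
--     # Build a first-match index once, then traverse iteratively with an
--     # explicit stack (right child pushed first so the left subtree is
--     # expanded first, preserving A's preorder append order).
--     first = {}
--     for node in parsed_sent:
--         if node[0] not in first:
--             first[node[0]] = node
--     stack = [(topnode, index)]
--     while stack:
--         val, idx = stack.pop()
--         nodelist.append([val, idx])
--         node = first.get(val)
--         if node is not None:
--             stack.append((node[2], node[4]))
--             stack.append((node[1], node[4]))
--     return nodelist
-- ===== Notes on version B (the rewrite author's own statement) =====
-- stated objective: alternative
-- what changed: Replaces the recursive traversal that rescans parsed_sent linearly at every call with an iterative explicit-stack preorder traversal over a first-match dict index built once; it trades the per-visited-node rescan for a one-time index build.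
import Mathlib
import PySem

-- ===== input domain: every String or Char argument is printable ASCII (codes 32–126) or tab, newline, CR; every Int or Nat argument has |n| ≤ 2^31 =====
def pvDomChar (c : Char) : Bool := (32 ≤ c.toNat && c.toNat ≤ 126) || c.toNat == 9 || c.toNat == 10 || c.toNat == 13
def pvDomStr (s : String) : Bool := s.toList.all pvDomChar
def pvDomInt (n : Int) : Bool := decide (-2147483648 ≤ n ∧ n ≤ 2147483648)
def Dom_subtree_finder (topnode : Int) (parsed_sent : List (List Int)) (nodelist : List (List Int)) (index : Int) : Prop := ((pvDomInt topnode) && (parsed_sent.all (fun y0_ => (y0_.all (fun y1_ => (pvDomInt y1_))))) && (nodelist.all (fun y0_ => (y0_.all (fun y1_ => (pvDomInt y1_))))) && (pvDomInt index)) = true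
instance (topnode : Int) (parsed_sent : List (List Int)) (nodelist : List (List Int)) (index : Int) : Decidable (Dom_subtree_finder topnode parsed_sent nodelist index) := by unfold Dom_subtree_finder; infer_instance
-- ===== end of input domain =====

-- B replaces A's recursive traversal (which rescans parsed_sent at every call) by an
-- iterative explicit-stack preorder traversal over a first-match index built once;
-- both A and B append the visited nodes to the caller's nodelist (equivalence is about
-- the returned value, which is that same list).


-- ===== PORT A =====
-- node[0] == topnode, the for-loop's test
def pvMatch (k : Int) (nd : List Int) : Bool := PySem.List.pyGet? nd 0 == some k

-- 'for node in parsed_sent: if node[0]==topnode: … return' — the first matching node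
def pvFindA (parsed : List (List Int)) (k : Int) : Option (List Int) :=
  parsed.find? (pvMatch k)

-- A's recursion, made total with fuel; subtree_finder supplies fuel parsed.length+1,
-- which Pre_ (no reachable cycle) makes sufficient.
def subtreeFuelA : Nat → Int → List (List Int) → List (List Int) → Int → List (List Int)
  | 0, topnode, _, nodelist, index => nodelist ++ [[topnode, index]]
  | fuel+1, topnode, parsed, nodelist, index =>
    let nl := nodelist ++ [[topnode, index]]
    match pvFindA parsed topnode with
    | none => nl
    | some nd =>
      -- subtr1 = node[1]; subtr2 = node[2]; index = node[4]  (Python raises if absent: outside Pre_)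
      match PySem.List.pyGet? nd 1, PySem.List.pyGet? nd 2, PySem.List.pyGet? nd 4 with
      | some s1, some s2, some ix =>
          subtreeFuelA fuel s2 parsed (subtreeFuelA fuel s1 parsed nl ix) ix
      | _, _, _ => nl

def subtree_finder (topnode : Int) (parsed_sent : List (List Int)) (nodelist : List (List Int)) (index : Int) : List (List Int) :=
  subtreeFuelA (parsed_sent.length + 1) topnode parsed_sent nodelist index

-- ===== PORT B =====
-- first = {}; for node in parsed_sent: if node[0] not in first: first[node[0]] = node
def pvFirstMap (parsed : List (List Int)) : PySem.Dict Int (List Int) :=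
  parsed.foldl
    (fun d nd =>
      match PySem.List.pyGet? nd 0 with
      | some k => if d.contains k then d else d.insert k nd
      | none => d)   -- Python raises on an empty node: outside Pre_
    PySem.Dict.empty

-- the while-stack loop, made total with fuel; 2^(n+1) pops suffice under Pre_
def loopB : Nat → PySem.Dict Int (List Int) → List (Int × Int) → List (List Int) → List (List Int)
  | _, _, [], acc => acc
  | 0, _, _ :: _, acc => acc
  | fuel+1, first, (v, i) :: rest, acc =>
    let acc' := acc ++ [[v, i]]
    match first.get? v with
    | none => loopB fuel first rest acc'
    | some nd =>
      match PySem.List.pyGet? nd 1, PySem.List.pyGet? nd 2, PySem.List.pyGet? nd 4 with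
      | some s1, some s2, some ix => loopB fuel first ((s1, ix) :: (s2, ix) :: rest) acc'
      | _, _, _ => loopB fuel first rest acc'   -- Python raises here: outside Pre_

def subtree_finder_alt (topnode : Int) (parsed_sent : List (List Int)) (nodelist : List (List Int)) (index : Int) : List (List Int) :=
  loopB (2 ^ (parsed_sent.length + 1)) (pvFirstMap parsed_sent) [(topnode, index)] nodelist

-- ===== PRECONDITION & SPEC =====
-- The children a key leads to: the first row whose head is the key contributes its
-- fields 1 and 2 (when present).  pvReach is the transitive closure of this
-- child-reference relation of the INPUT table — a property of the input graph, not a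
-- simulation of either port (it computes a set of keys, never either output).
def pvKids (parsed : List (List Int)) (v : Int) : List Int :=
  match pvFindA parsed v with
  | none => []
  | some nd =>
    match PySem.List.pyGet? nd 1, PySem.List.pyGet? nd 2 with
    | some a, some b => [a, b]
    | _, _ => []

def pvStep (parsed : List (List Int)) (S : List Int) : List Int :=
  (S ++ S.flatMap (pvKids parsed)).dedup

def pvReachN (parsed : List (List Int)) : Nat → List Int → List Int
  | 0, S => S
  | n+1, S => pvReachN parsed n (pvStep parsed S)

-- 2*len+2 iterations reach the fixpoint: the closure has at most 1+2*len elements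
def pvReach (parsed : List (List Int)) (v : Int) : List Int :=
  pvReachN parsed (2 * parsed.length + 2) [v]

-- per-key check: a matched key's row has the 5 fields A reads, and the key is not
-- reachable from its own children (no cycle through it)
def pvOK (parsed : List (List Int)) (v : Int) : Bool :=
  match pvFindA parsed v with
  | none => true
  | some nd =>
    decide (5 ≤ nd.length) &&
    (pvKids parsed v).all (fun c => !(pvReach parsed c).contains v)

-- Pre_ holds exactly when A returns: it excludes only inputs on which A raises — an
-- empty row (IndexError: when A terminates, some scan reaches the end of the table and
-- touches every row), a matched row with fewer than 5 fields reachable from topnode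
-- (IndexError reading node[1]/node[2]/node[4]), or a cycle reachable from topnode
-- (RecursionError).
def Pre_subtree_finder (topnode : Int) (parsed_sent : List (List Int)) (nodelist : List (List Int)) (index : Int) : Prop :=
  (parsed_sent.all (fun nd => !nd.isEmpty) &&
    (pvReach parsed_sent topnode).all (pvOK parsed_sent)) = true

instance (topnode : Int) (parsed_sent : List (List Int)) (nodelist : List (List Int)) (index : Int) : Decidable (Pre_subtree_finder topnode parsed_sent nodelist index) := by
  unfold Pre_subtree_finder; infer_instance

-- a backward reference (the row for key 2 precedes the row for key 1 that points to it)
def pvWitness_subtree_finder : Int × List (List Int) × List (List Int) × Int :=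
  (1, [[2, 0, 0, 0, 8], [1, 2, 3, 0, 7]], [[5, 5]], 4)

def Spec_subtree_finder (topnode : Int) (parsed_sent : List (List Int)) (nodelist : List (List Int)) (index : Int) (out : List (List Int)) : Prop := out = subtree_finder_alt topnode parsed_sent nodelist index
instance (topnode : Int) (parsed_sent : List (List Int)) (nodelist : List (List Int)) (index : Int) (out : List (List Int)) : Decidable (Spec_subtree_finder topnode parsed_sent nodelist index out) := by unfold Spec_subtree_finder; infer_instance

-- ===== CLAIM (what is proved, stated in full; the proofs are below) =====
def Claim_equal_subtree_finder : Prop := ∀ (topnode : Int) (parsed_sent : List (List Int)) (nodelist : List (List Int)) (index : Int), Dom_subtree_finder topnode parsed_sent nodelist index → Pre_subtree_finder topnode parsed_sent nodelist index → Spec_subtree_finder topnode parsed_sent nodelist index (subtree_finder topnode parsed_sent nodelist index)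

-- ===== LEMMAS AND PROOFS =====

theorem mem_pvStep (parsed : List (List Int)) (S : List Int) (x : Int) :
    x ∈ pvStep parsed S ↔ x ∈ S ∨ ∃ v ∈ S, x ∈ pvKids parsed v := by
  simp [pvStep, List.mem_dedup, List.mem_append, List.mem_flatMap]

theorem pvReachN_mem_mono (parsed : List (List Int)) :
    ∀ (n : Nat) (S : List Int) (x : Int), x ∈ S → x ∈ pvReachN parsed n S := by
  intro n
  induction n with
  | zero => intro S x hx; exact hx
  | succ n ih =>
    intro S x hx
    exact ih (pvStep parsed S) x ((mem_pvStep parsed S x).mpr (Or.inl hx))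

theorem pvReachN_min (parsed : List (List Int)) (T : List Int)
    (hT : ∀ v ∈ T, ∀ c ∈ pvKids parsed v, c ∈ T) :
    ∀ (n : Nat) (S : List Int), (∀ x ∈ S, x ∈ T) → ∀ x ∈ pvReachN parsed n S, x ∈ T := by
  intro n
  induction n with
  | zero => intro S hS x hx; exact hS x hx
  | succ n ih =>
    intro S hS x hx
    refine ih (pvStep parsed S) ?_ x hx
    intro y hy
    rcases (mem_pvStep parsed S y).mp hy with h | ⟨v, hv, hk⟩
    · exact hS y h
    · exact hT v (hS v hv) y hk

theorem pvStep_stable (parsed : List (List Int)) :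
    ∀ (n : Nat) (S : List Int), (∀ x ∈ pvStep parsed S, x ∈ S) →
      ∀ x ∈ pvReachN parsed n S, x ∈ S := by
  intro n
  induction n with
  | zero => intro S _ x hx; exact hx
  | succ n ih =>
    intro S hS x hx
    have hstep : ∀ y ∈ pvStep parsed (pvStep parsed S), y ∈ pvStep parsed S := by
      intro y hy
      rcases (mem_pvStep parsed _ y).mp hy with h | ⟨v, hv, hk⟩
      · exact h
      · exact (mem_pvStep parsed S y).mpr (Or.inr ⟨v, hS v hv, hk⟩)
    exact hS x (ih (pvStep parsed S) hstep x hx)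

theorem pvStep_grow (parsed : List (List Int)) (S : List Int)
    (h : ¬ ∀ x ∈ pvStep parsed S, x ∈ S) :
    S.dedup.length < (pvStep parsed S).dedup.length := by
  push_neg at h
  obtain ⟨x, hx, hxS⟩ := h
  have hnd : (pvStep parsed S).Nodup := List.nodup_dedup _
  have hded : (pvStep parsed S).dedup = pvStep parsed S := List.Nodup.dedup hnd
  rw [hded]
  have hsub : (x :: S.dedup) ⊆ pvStep parsed S := by
    intro y hy
    rcases List.mem_cons.mp hy with rfl | hy
    · exact hx
    · exact (mem_pvStep parsed S y).mpr (Or.inl (List.mem_dedup.mp hy))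
  have hnd2 : (x :: S.dedup).Nodup :=
    List.Nodup.cons (fun h' => hxS (List.mem_dedup.mp h')) (List.nodup_dedup S)
  have := (List.Nodup.subperm hnd2 hsub).length_le
  simpa using this

-- every child value anywhere in the table
def pvAllKids (parsed : List (List Int)) : List Int :=
  parsed.flatMap (fun nd =>
    match PySem.List.pyGet? nd 1, PySem.List.pyGet? nd 2 with
    | some a, some b => [a, b]
    | _, _ => [])

theorem pvKids_subset_allKids (parsed : List (List Int)) (v x : Int)
    (hx : x ∈ pvKids parsed v) : x ∈ pvAllKids parsed := by
  unfold pvKids at hx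
  cases hf : pvFindA parsed v with
  | none => rw [hf] at hx; simp at hx
  | some nd =>
    rw [hf] at hx
    have hmem : nd ∈ parsed := List.mem_of_find?_eq_some hf
    unfold pvAllKids
    rw [List.mem_flatMap]
    exact ⟨nd, hmem, hx⟩

theorem pvAllKids_length (parsed : List (List Int)) :
    (pvAllKids parsed).length ≤ 2 * parsed.length := by
  induction parsed with
  | nil => simp [pvAllKids]
  | cons nd tl ih =>
    unfold pvAllKids at ih ⊢
    rw [List.flatMap_cons, List.length_append, List.length_cons]
    have : (match PySem.List.pyGet? nd 1, PySem.List.pyGet? nd 2 with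
      | some a, some b => [a, b]
      | _, _ => ([] : List Int)).length ≤ 2 := by
      cases PySem.List.pyGet? nd 1 <;> cases PySem.List.pyGet? nd 2 <;> simp
    omega

theorem pvReachN_elems (parsed : List (List Int)) :
    ∀ (n : Nat) (S : List Int), ∀ x ∈ pvReachN parsed n S, x ∈ S ∨ x ∈ pvAllKids parsed := by
  intro n
  induction n with
  | zero => intro S x hx; exact Or.inl hx
  | succ n ih =>
    intro S x hx
    rcases ih (pvStep parsed S) x hx with h | h
    · rcases (mem_pvStep parsed S x).mp h with h' | ⟨v, _, hk⟩
      · exact Or.inl h'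
      · exact Or.inr (pvKids_subset_allKids parsed v x hk)
    · exact Or.inr h

theorem pvClosed_or_grow (parsed : List (List Int)) :
    ∀ (n : Nat) (S : List Int),
      (∀ x ∈ pvReachN parsed n S, ∀ c ∈ pvKids parsed x, c ∈ pvReachN parsed n S) ∨
      S.dedup.length + n ≤ (pvReachN parsed n S).dedup.length := by
  intro n
  induction n with
  | zero => intro S; right; simp [pvReachN]
  | succ n ih =>
    intro S
    by_cases hst : ∀ x ∈ pvStep parsed S, x ∈ S
    · left
      intro x hx c hc
      have hstep : ∀ y ∈ pvStep parsed (pvStep parsed S), y ∈ pvStep parsed S := by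
        intro y hy
        rcases (mem_pvStep parsed _ y).mp hy with h | ⟨v, hv, hk⟩
        · exact h
        · exact (mem_pvStep parsed S y).mpr (Or.inr ⟨v, hst v hv, hk⟩)
      have hxS : x ∈ pvStep parsed S :=
        pvStep_stable parsed n (pvStep parsed S) hstep x hx
      have hcS : c ∈ pvStep parsed S :=
        hstep c ((mem_pvStep parsed _ c).mpr (Or.inr ⟨x, hxS, hc⟩))
      exact pvReachN_mem_mono parsed n (pvStep parsed S) c hcS
    · rcases ih (pvStep parsed S) with h | h
      · left; exact h
      · right
        have := pvStep_grow parsed S hst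
        show S.dedup.length + (n + 1) ≤ (pvReachN parsed n (pvStep parsed S)).dedup.length
        omega

theorem pvReach_closed (parsed : List (List Int)) (t : Int) :
    ∀ x ∈ pvReach parsed t, ∀ c ∈ pvKids parsed x, c ∈ pvReach parsed t := by
  rcases pvClosed_or_grow parsed (2 * parsed.length + 2) [t] with h | h
  · exact h
  · exfalso
    have hnd : (pvReach parsed t).dedup.Nodup := List.nodup_dedup _
    have hsub : (pvReach parsed t).dedup ⊆ t :: pvAllKids parsed := by
      intro y hy
      rcases pvReachN_elems parsed (2 * parsed.length + 2) [t] y (List.mem_dedup.mp hy) with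
        h' | h'
      · simp at h'; simp [h']
      · exact List.mem_cons_of_mem _ h'
    have hle := (List.Nodup.subperm hnd hsub).length_le
    have := pvAllKids_length parsed
    simp only [List.length_cons] at hle
    unfold pvReach at hle
    have hdd : ([t] : List Int).dedup.length = 1 := by simp
    omega

theorem pvSelf_mem_reach (parsed : List (List Int)) (v : Int) : v ∈ pvReach parsed v :=
  pvReachN_mem_mono parsed _ [v] v (by simp)

theorem pvReach_kid_subset (parsed : List (List Int)) (t v c : Int)
    (hv : v ∈ pvReach parsed t) (hc : c ∈ pvKids parsed v) :
    ∀ x ∈ pvReach parsed c, x ∈ pvReach parsed t := by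
  have hcT : c ∈ pvReach parsed t := pvReach_closed parsed t v hv c hc
  exact pvReachN_min parsed (pvReach parsed t) (pvReach_closed parsed t) _ [c]
    (by intro x hx; simp at hx; simpa [hx] using hcT)

-- the recursion measure: the number of matched keys reachable from v
def pvM (parsed : List (List Int)) (v : Int) : Nat :=
  ((pvReach parsed v).dedup.filter (fun k => (pvFindA parsed k).isSome)).length

theorem pvM_pos (parsed : List (List Int)) (v : Int)
    (h : (pvFindA parsed v).isSome) : 0 < pvM parsed v := by
  unfold pvM
  have : v ∈ (pvReach parsed v).dedup.filter (fun k => (pvFindA parsed k).isSome) := by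
    rw [List.mem_filter]
    exact ⟨List.mem_dedup.mpr (pvSelf_mem_reach parsed v), h⟩
  exact List.length_pos_of_mem this

theorem pvM_lt (parsed : List (List Int)) (v c : Int)
    (hmatch : (pvFindA parsed v).isSome) (hc : c ∈ pvKids parsed v)
    (hacy : v ∉ pvReach parsed c) : pvM parsed c < pvM parsed v := by
  unfold pvM
  set l1 := (pvReach parsed c).dedup.filter (fun k => (pvFindA parsed k).isSome) with hl1
  set l2 := (pvReach parsed v).dedup.filter (fun k => (pvFindA parsed k).isSome) with hl2
  have hnd1 : l1.Nodup := List.Nodup.filter _ (List.nodup_dedup _)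
  have hvl1 : v ∉ l1 := by
    intro h
    exact hacy (List.mem_dedup.mp (List.mem_filter.mp h).1)
  have hsub : (v :: l1) ⊆ l2 := by
    intro y hy
    rcases List.mem_cons.mp hy with rfl | hy
    · rw [hl2, List.mem_filter]
      exact ⟨List.mem_dedup.mpr (pvSelf_mem_reach parsed y), hmatch⟩
    · rw [hl1, List.mem_filter] at hy
      rw [hl2, List.mem_filter]
      exact ⟨List.mem_dedup.mpr
        (pvReach_kid_subset parsed v v c (pvSelf_mem_reach parsed v) hc y
          (List.mem_dedup.mp hy.1)), hy.2⟩
  have hnd : (v :: l1).Nodup := List.Nodup.cons hvl1 hnd1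
  have := (List.Nodup.subperm hnd hsub).length_le
  simpa using this

def pvFirstIdx (parsed : List (List Int)) (k : Int) : Option Nat :=
  parsed.findIdx? (pvMatch k)

-- find? and findIdx? agree
theorem pvFind_pair (parsed : List (List Int)) (k : Int) :
    (pvFirstIdx parsed k = none ∧ pvFindA parsed k = none) ∨
    (∃ j nd, pvFirstIdx parsed k = some j ∧ pvFindA parsed k = some nd ∧
       parsed[j]? = some nd ∧ pvMatch k nd = true ∧ j < parsed.length) := by
  induction parsed with
  | nil => left; simp [pvFirstIdx, pvFindA]
  | cons hd tl ih =>
    by_cases h : pvMatch k hd = true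
    · right
      exact ⟨0, hd, by simp [pvFirstIdx, List.findIdx?_cons, h], by simp [pvFindA, h], by simp, h,
        by simp⟩
    · rcases ih with ⟨h1, h2⟩ | ⟨j, nd, h1, h2, h3, h4, h5⟩
      · left
        refine ⟨?_, ?_⟩
        · simp only [pvFirstIdx] at h1 ⊢
          simp [List.findIdx?_cons, h, h1]
        · simp only [pvFindA] at h2 ⊢
          simp [List.find?_cons, h, h2]
      · right
        refine ⟨j + 1, nd, ?_, ?_, by simpa using h3, h4, by simpa using h5⟩
        · simp only [pvFirstIdx] at h1 ⊢
          simp [List.findIdx?_cons, h, h1]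
        · simp only [pvFindA] at h2 ⊢
          simp [List.find?_cons, h, h2]

theorem pvM_le (parsed : List (List Int)) (v : Int) : pvM parsed v ≤ parsed.length := by
  unfold pvM
  set l := (pvReach parsed v).dedup.filter (fun k => (pvFindA parsed k).isSome) with hl
  have hnd : l.Nodup := List.Nodup.filter _ (List.nodup_dedup _)
  have hmem : ∀ a ∈ l, ∃ j nd, pvFirstIdx parsed a = some j ∧ parsed[j]? = some nd ∧
      pvMatch a nd = true ∧ j < parsed.length := by
    intro a ha
    have := (List.mem_filter.mp ha).2
    rcases pvFind_pair parsed a with ⟨_, h2⟩ | ⟨j, nd, h1, _, h3, h4, h5⟩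
    · rw [h2] at this; simp at this
    · exact ⟨j, nd, h1, h3, h4, h5⟩
  set g := fun k => (pvFirstIdx parsed k).getD 0 with hg
  have hinj : ∀ a ∈ l, ∀ b ∈ l, g a = g b → a = b := by
    intro a ha b hb hab
    obtain ⟨j, nd, e1, e2, e3, _⟩ := hmem a ha
    obtain ⟨j', nd', f1, f2, f3, _⟩ := hmem b hb
    rw [hg] at hab
    simp only [e1, f1, Option.getD_some] at hab
    subst hab
    rw [e2] at f2
    injection f2 with f2
    subst f2
    unfold pvMatch at e3 f3
    cases hget : PySem.List.pyGet? nd 0 with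
    | none => rw [hget] at e3; simp at e3
    | some w =>
      rw [hget] at e3 f3
      simp at e3 f3
      omega
  have hndm : (l.map g).Nodup := List.Nodup.map_on hinj hnd
  have hsubm : (l.map g) ⊆ List.range parsed.length := by
    intro y hy
    rw [List.mem_map] at hy
    obtain ⟨a, ha, rfl⟩ := hy
    obtain ⟨j, nd, e1, _, _, e4⟩ := hmem a ha
    rw [hg]
    simp only [e1, Option.getD_some]
    exact List.mem_range.mpr e4
  have := (List.Nodup.subperm hndm hsubm).length_le
  simpa using this

theorem pvFirstMap_aux (l : List (List Int)) :
    ∀ (d : PySem.Dict Int (List Int)) (k : Int),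
      (∀ nd ∈ l, nd.isEmpty = false) →
      (l.foldl (fun d nd =>
          match PySem.List.pyGet? nd 0 with
          | some k => if d.contains k then d else d.insert k nd
          | none => d) d).get? k =
      (match d.get? k with | some v => some v | none => pvFindA l k) := by
  induction l with
  | nil =>
    intro d k _
    simp only [List.foldl_nil]
    cases d.get? k <;> simp [pvFindA]
  | cons nd tl ih =>
    intro d k hne
    obtain ⟨a, t, rfl⟩ : ∃ a t, nd = a :: t := by
      cases nd with
      | nil => simpa using hne [] (by simp)
      | cons a t => exact ⟨a, t, rfl⟩
    have h0 : PySem.List.pyGet? (a :: t) 0 = some a := by simp [PySem.List.pyGet?, PySem.List.pyIdx?]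
    have hm : pvMatch k (a :: t) = (a == k) := by
      simp only [pvMatch, h0, Option.some.injEq]
      rfl
    simp only [List.foldl_cons, h0]
    by_cases hc : d.contains a
    · rw [if_pos hc, ih d k (fun x hx => hne x (by simp [hx]))]
      by_cases hak : a = k
      · subst hak
        have : (d.get? a).isSome := by
          rw [← PySem.Dict.contains_eq_isSome_get?]; exact hc
        cases hg : d.get? a with
        | none => rw [hg] at this; simp at this
        | some v => simp
      · cases d.get? k <;>
          simp [pvFindA, List.find?_cons, hm, show (a == k) = false by simpa using hak]
    · rw [if_neg hc, ih (d.insert a (a :: t)) k (fun x hx => hne x (by simp [hx]))]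
      have hdg : d.get? a = none := by
        cases hg : d.get? a with
        | none => rfl
        | some v =>
          exfalso; apply hc
          rw [PySem.Dict.contains_eq_isSome_get?, hg]; rfl
      rw [PySem.Dict.get?_insert]
      by_cases hak : k = a
      · subst hak
        rw [if_pos rfl, hdg]
        simp [pvFindA, List.find?_cons, hm]
      · rw [if_neg hak]
        cases d.get? k <;>
          simp [pvFindA, List.find?_cons, hm, show (a == k) = false by simp; omega]

theorem pvFirstMap_get? (parsed : List (List Int)) (k : Int)
    (hne : ∀ nd ∈ parsed, nd.isEmpty = false) :
    (pvFirstMap parsed).get? k = pvFindA parsed k := by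
  unfold pvFirstMap
  rw [pvFirstMap_aux parsed PySem.Dict.empty k hne]
  simp [PySem.Dict.get?_empty]

-- the Pre_ facts at one reachable matched key: the 5 fields exist and no child reaches back
theorem pre_matchable (parsed : List (List Int)) (t : Int)
    (hpre : (pvReach parsed t).all (pvOK parsed) = true)
    (v : Int) (hv : v ∈ pvReach parsed t) (nd : List Int)
    (hf : pvFindA parsed v = some nd) :
    ∃ s1 s2 ix, PySem.List.pyGet? nd 1 = some s1 ∧ PySem.List.pyGet? nd 2 = some s2 ∧
      PySem.List.pyGet? nd 4 = some ix ∧ pvKids parsed v = [s1, s2] ∧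
      v ∉ pvReach parsed s1 ∧ v ∉ pvReach parsed s2 := by
  have hok := List.all_eq_true.mp hpre v hv
  unfold pvOK at hok
  rw [hf] at hok
  rw [Bool.and_eq_true, decide_eq_true_iff] at hok
  obtain ⟨hlen, hacy⟩ := hok
  have e1 : PySem.List.pyGet? nd 1 = some nd[1] := by
    have := PySem.List.pyGet?_ofNat nd 1 (by omega)
    simpa using this
  have e2 : PySem.List.pyGet? nd 2 = some nd[2] := by
    have := PySem.List.pyGet?_ofNat nd 2 (by omega)
    simpa using this
  have e4 : PySem.List.pyGet? nd 4 = some nd[4] := by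
    have := PySem.List.pyGet?_ofNat nd 4 (by omega)
    simpa using this
  have hkids : pvKids parsed v = [nd[1], nd[2]] := by
    unfold pvKids
    rw [hf]
    simp [e1, e2]
  refine ⟨nd[1], nd[2], nd[4], e1, e2, e4, hkids, ?_, ?_⟩
  · have := List.all_eq_true.mp hacy nd[1] (by rw [hkids]; simp)
    simpa using this
  · have := List.all_eq_true.mp hacy nd[2] (by rw [hkids]; simp)
    simpa using this

-- the central simulation: one stack entry expands to one recursive call of A
theorem loopB_sim (parsed : List (List Int)) (t : Int)
    (hne : ∀ nd ∈ parsed, nd.isEmpty = false)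
    (hpre : (pvReach parsed t).all (pvOK parsed) = true) :
    ∀ (d : Nat) (v i : Int), ∀ acc : List (List Int), ∀ stack : List (Int × Int), ∀ fA : Nat,
      v ∈ pvReach parsed t → pvM parsed v ≤ d → d < fA →
      ∃ c : Nat, 0 < c ∧ c < 2 ^ (d + 1) ∧
        ∀ fB : Nat, c ≤ fB →
          loopB fB (pvFirstMap parsed) ((v, i) :: stack) acc =
          loopB (fB - c) (pvFirstMap parsed) stack (subtreeFuelA fA v parsed acc i) := by
  have hget := fun k => pvFirstMap_get? parsed k hne
  intro d
  induction d with
  | zero =>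
    intro v i acc stack fA hv hrank hfA
    have hnone : pvFindA parsed v = none := by
      cases hf : pvFindA parsed v with
      | none => rfl
      | some nd =>
        exfalso
        have := pvM_pos parsed v (by rw [hf]; rfl)
        omega
    refine ⟨1, by omega, by norm_num, ?_⟩
    intro fB hfB
    obtain ⟨fb, rfl⟩ : ∃ fb, fB = fb + 1 := ⟨fB - 1, by omega⟩
    obtain ⟨f, rfl⟩ : ∃ f, fA = f + 1 := ⟨fA - 1, by omega⟩
    simp only [loopB, subtreeFuelA, hget, hnone, Nat.add_sub_cancel]
  | succ d ih =>
    intro v i acc stack fA hv hrank hfA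
    cases hf : pvFindA parsed v with
    | none =>
      refine ⟨1, by omega, Nat.one_lt_two_pow_iff.mpr (by omega), ?_⟩
      intro fB hfB
      obtain ⟨fb, rfl⟩ : ∃ fb, fB = fb + 1 := ⟨fB - 1, by omega⟩
      obtain ⟨f, rfl⟩ : ∃ f, fA = f + 1 := ⟨fA - 1, by omega⟩
      simp only [loopB, subtreeFuelA, hget, hf, Nat.add_sub_cancel]
    | some nd =>
      obtain ⟨s1, s2, ix, e1, e2, e4, hkids, ha1, ha2⟩ :=
        pre_matchable parsed t hpre v hv nd hf
      have hmatch : (pvFindA parsed v).isSome = true := by rw [hf]; rfl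
      have hs1k : s1 ∈ pvKids parsed v := by rw [hkids]; simp
      have hs2k : s2 ∈ pvKids parsed v := by rw [hkids]; simp
      have hs1t : s1 ∈ pvReach parsed t := pvReach_closed parsed t v hv s1 hs1k
      have hs2t : s2 ∈ pvReach parsed t := pvReach_closed parsed t v hv s2 hs2k
      have hr1 : pvM parsed s1 ≤ d := by
        have := pvM_lt parsed v s1 hmatch hs1k ha1; omega
      have hr2 : pvM parsed s2 ≤ d := by
        have := pvM_lt parsed v s2 hmatch hs2k ha2; omega
      obtain ⟨f, rfl⟩ : ∃ f, fA = f + 1 := ⟨fA - 1, by omega⟩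
      have hdf : d < f := by omega
      obtain ⟨c1, hc1p, hc1b, hs1⟩ :=
        ih s1 ix (acc ++ [[v, i]]) ((s2, ix) :: stack) f hs1t hr1 hdf
      obtain ⟨c2, hc2p, hc2b, hs2⟩ :=
        ih s2 ix (subtreeFuelA f s1 parsed (acc ++ [[v, i]]) ix) stack f hs2t hr2 hdf
      refine ⟨1 + c1 + c2, by omega, ?_, ?_⟩
      · have : (2 : Nat) ^ (d + 1 + 1) = 2 ^ (d + 1) * 2 := pow_succ 2 (d + 1)
        omega
      · intro fB hfB
        obtain ⟨fb, rfl⟩ : ∃ fb, fB = fb + 1 := ⟨fB - 1, by omega⟩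
        simp only [loopB, subtreeFuelA, hget, hf, e1, e2, e4]
        rw [hs1 fb (by omega), hs2 (fb - c1) (by omega)]
        congr 1
        omega

theorem loopB_nil (f : Nat) (first : PySem.Dict Int (List Int)) (acc : List (List Int)) :
    loopB f first [] acc = acc := by
  cases f <;> rfl

theorem subtree_finder_spec : Claim_equal_subtree_finder := by
  intro topnode parsed_sent nodelist index _ hpre
  unfold Pre_subtree_finder at hpre
  rw [Bool.and_eq_true] at hpre
  obtain ⟨hne, hreach⟩ := hpre
  have hne' : ∀ nd ∈ parsed_sent, nd.isEmpty = false := by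
    intro nd hnd
    simpa using (List.all_eq_true.mp hne) nd hnd
  unfold Spec_subtree_finder subtree_finder subtree_finder_alt
  obtain ⟨c, hcp, hcb, hsim⟩ :=
    loopB_sim parsed_sent topnode hne' hreach parsed_sent.length topnode index nodelist []
      (parsed_sent.length + 1) (pvSelf_mem_reach parsed_sent topnode)
      (pvM_le parsed_sent topnode) (by omega)
  rw [hsim (2 ^ (parsed_sent.length + 1)) (by omega), loopB_nil]
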